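-- pv_equiv track=rewrite | github.com/poojatathod/Python_Practice | translate.py | translate1
-- ===== SOURCE A (Python) =====
-- def translate1(string):
--     list1=[]
--     for x in string:
--         if x not in string1:
--             list1.append(x)
--             list1.append("o")
--             list1.append(x)
--         else:
--             list1.append(x)
--     return ''.join(list1)
--
-- string1="aeiouAEIOU "
-- ===== SOURCE B (Python) =====
-- import re
--
-- def translate1(string):
--     # every char outside the vowel/space class becomes <c>o<c>; vowels and spaces pass through
--     return re.sub(r'([^aeiouAEIOU ])', r'\1o\1', string)
-- ===== Notes on version B (the rewrite author's own statement) =====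
-- stated objective: idiomatic
-- what changed: Replaced the manual list-append loop and join with a single regex substitution that rewrites every non-vowel/non-space character in one pass.
import Mathlib
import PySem

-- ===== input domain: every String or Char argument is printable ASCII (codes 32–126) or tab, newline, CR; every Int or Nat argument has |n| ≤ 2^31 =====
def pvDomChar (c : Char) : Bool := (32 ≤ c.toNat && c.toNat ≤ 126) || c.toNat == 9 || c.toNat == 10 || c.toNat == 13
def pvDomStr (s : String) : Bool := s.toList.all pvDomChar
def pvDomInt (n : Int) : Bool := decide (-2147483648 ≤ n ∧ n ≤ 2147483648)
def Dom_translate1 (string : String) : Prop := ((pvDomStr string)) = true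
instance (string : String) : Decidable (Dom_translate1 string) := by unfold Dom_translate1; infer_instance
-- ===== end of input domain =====

-- B replaces A's explicit append loop with a single regex substitution (idiomatic; same cost).

-- ===== PORT A =====
-- module constant string1
def pvString1 : String := "aeiouAEIOU "

def translate1 (string : String) : String :=
  let list1 := string.toList.foldl (fun list1 x =>
      if x ∉ pvString1.toList then
        list1 ++ [String.ofList [x], "o", String.ofList [x]]
      else
        list1 ++ [String.ofList [x]]) ([] : List String)
  PySem.Str.join "" list1

-- ===== PORT B =====
-- re.sub with the one-character pattern r'([^aeiouAEIOU ])' and replacement r'\1o\1' is exactly a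
-- per-character substitution: each char outside the class becomes [c,'o',c], others are kept.
def translate1_alt (string : String) : String :=
  String.ofList (string.toList.flatMap (fun c =>
    if c ∈ "aeiouAEIOU ".toList then [c] else [c, 'o', c]))

-- ===== PRECONDITION & SPEC =====
def Spec_translate1 (string : String) (out : String) : Prop := out = translate1_alt string
instance (string : String) (out : String) : Decidable (Spec_translate1 string out) := by unfold Spec_translate1; infer_instance

-- ===== CLAIM (what is proved, stated in full; the proofs are below) =====
def Claim_equal_translate1 : Prop := ∀ (string : String), Dom_translate1 string → Spec_translate1 string (translate1 string)

-- ===== LEMMAS AND PROOFS =====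
theorem pv_flatten_intersperse_nil {α : Type} (l : List (List α)) :
    (List.intersperse ([] : List α) l).flatten = l.flatten := by
  induction l with
  | nil => rfl
  | cons a t ih =>
    cases t with
    | nil => rfl
    | cons b t' => simp_all [List.intersperse]

theorem pv_join_nil_eq_flatten (l : List (List Char)) :
    PySem.Chars.join [] l = l.flatten := by
  simp [PySem.Chars.join, List.intercalate, pv_flatten_intersperse_nil]

theorem pv_foldl_acc (xs : List Char) (acc : List String) :
    xs.foldl (fun list1 x =>
      if x ∉ pvString1.toList then
        list1 ++ [String.ofList [x], "o", String.ofList [x]]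
      else
        list1 ++ [String.ofList [x]]) acc
    = acc ++ xs.flatMap (fun x =>
        if x ∉ pvString1.toList then
          [String.ofList [x], "o", String.ofList [x]]
        else
          [String.ofList [x]]) := by
  induction xs generalizing acc with
  | nil => simp
  | cons x t ih =>
    by_cases h : x ∈ pvString1.toList <;>
      simp only [List.foldl_cons, List.flatMap_cons, h, not_true_eq_false, not_false_eq_true,
        if_true, if_false] <;>
      rw [ih, List.append_assoc]

theorem pv_toList_eq (xs : List Char) :
    (List.map String.toList (xs.flatMap (fun x =>
        if x ∉ pvString1.toList then
          [String.ofList [x], "o", String.ofList [x]]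
        else
          [String.ofList [x]]))).flatten
    = xs.flatMap (fun c =>
        if c ∈ "aeiouAEIOU ".toList then [c] else [c, 'o', c]) := by
  induction xs with
  | nil => rfl
  | cons x t ih =>
    have e : pvString1.toList = "aeiouAEIOU ".toList := rfl
    have ho : "o".toList = ['o'] := rfl
    simp only [e] at ih ⊢
    by_cases h : x ∈ "aeiouAEIOU ".toList <;>
      simp only [List.flatMap_cons, h, not_true_eq_false, not_false_eq_true, if_true, if_false,
        List.map_cons, List.flatten_cons, String.toList_ofList, ho, ih, List.cons_append,
        List.nil_append]

-- ===== VERDICT (by name: the statement is the Claim_ definition above) =====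
theorem translate1_spec : Claim_equal_translate1 := by
  intro s _
  unfold Spec_translate1 translate1 translate1_alt
  have h : (PySem.Str.join "" (s.toList.foldl (fun list1 x =>
      if x ∉ pvString1.toList then
        list1 ++ [String.ofList [x], "o", String.ofList [x]]
      else
        list1 ++ [String.ofList [x]]) [])).toList
      = s.toList.flatMap (fun c =>
          if c ∈ "aeiouAEIOU ".toList then [c] else [c, 'o', c]) := by
    rw [pv_foldl_acc, PySem.Str.toList_join]
    simpa [pv_join_nil_eq_flatten] using pv_toList_eq s.toList
  have h2 := congrArg String.ofList h
  rw [String.ofList_toList] at h2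
  exact h2
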